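-- pv_equiv track=rewrite | github.com/maria-pugacheva/LeetCode | src/python/_01_easy/_2460_apply-operations-to-an-array.py | solution
-- ===== SOURCE A (Python) =====
-- from typing import List
--
-- def solution(nums: List[int]) -> List[int]:
--     """If nums[i] == nums[i + 1], multiply nums[i] by 2 and set
--     nums[i + 1] to 0. After performing the above, shift all the 0's to
--     the end of the array.
--
--     Examples:
--         >>> solution([0, 1])
--         [1, 0]
--         >>> solution([1, 0, 0])
--         [1, 0, 0]
--         >>> solution([1, 2, 2, 1, 1, 0])
--         [1, 4, 2, 0, 0, 0]
--     """
--     for i in range(len(nums) - 1):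
--         if nums[i] == nums[i + 1]:
--             nums[i], nums[i + 1] = nums[i] * 2, 0
--     j = 0
--     for k in range(len(nums)):
--         if nums[j] != 0:
--             j += 1
--         elif nums[k] != 0:
--             nums[j], nums[k] = nums[k], nums[j]
--             j += 1
--     return nums
-- ===== SOURCE B (Python) =====
-- from typing import List
--
-- def solution(nums: List[int]) -> List[int]:
--     # merge pass as a single left-to-right sweep carrying the current value
--     res = []
--     if nums:
--         cur = nums[0]
--         for x in nums[1:]:
--             if cur == x:
--                 res.append(cur * 2)
--                 cur = 0
--             else:
--                 res.append(cur)
--                 cur = x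
--         res.append(cur)
--     # zero shift: rebuild as nonzeros followed by the zeros, written back in place
--     nonzeros = [v for v in res if v != 0]
--     nums[:] = nonzeros + [0] * (len(nums) - len(nonzeros))
--     return nums
-- ===== Notes on version B (the rewrite author's own statement) =====
-- stated objective: alternative
-- what changed: The in-place index loop with simultaneous assignment becomes a single value-carrying sweep building a fresh merged list, and the two-pointer swap compaction is replaced by filtering the nonzeros and padding with zeros, written back with nums[:] = ...
import Mathlib
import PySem

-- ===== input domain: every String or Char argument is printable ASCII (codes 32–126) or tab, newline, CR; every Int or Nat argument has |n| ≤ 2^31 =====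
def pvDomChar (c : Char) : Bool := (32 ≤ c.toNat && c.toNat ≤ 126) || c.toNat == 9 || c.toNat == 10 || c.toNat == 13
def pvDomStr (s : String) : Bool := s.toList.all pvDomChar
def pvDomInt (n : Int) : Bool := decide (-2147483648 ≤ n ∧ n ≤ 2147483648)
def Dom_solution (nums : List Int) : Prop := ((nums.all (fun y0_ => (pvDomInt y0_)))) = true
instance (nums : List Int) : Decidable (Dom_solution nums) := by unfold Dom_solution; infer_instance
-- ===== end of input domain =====

-- B rebuilds the merged list in one value-carrying sweep and forms nonzeros ++ zeros instead of
-- A's in-place index loop and two-pointer swap compaction; A mutates its argument in place and B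
-- writes the result back with nums[:] = ..., so the proved equivalence (return value) covers the
-- observable list content as well.

-- ===== PORT A =====
-- first loop body: nums[i], nums[i+1] = nums[i]*2, 0 when equal (indices always in range)
def pvStep1 (a : List Int) (i : Nat) : List Int :=
  if a.getD i 0 = a.getD (i + 1) 0 then (a.set i (a.getD i 0 * 2)).set (i + 1) 0 else a

-- second loop body over (list, j): the zero-shifting two-pointer step (j ≤ k stays in range)
def pvStep2 (p : List Int × Nat) (k : Nat) : List Int × Nat :=
  if p.1.getD p.2 0 ≠ 0 then (p.1, p.2 + 1)
  else if p.1.getD k 0 ≠ 0 then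
    ((p.1.set p.2 (p.1.getD k 0)).set k (p.1.getD p.2 0), p.2 + 1)
  else p

def solution (nums : List Int) : List Int :=
  let m := (List.range (nums.length - 1)).foldl pvStep1 nums
  ((List.range m.length).foldl pvStep2 (m, 0)).1

-- ===== PORT B =====
-- the value-carrying merge sweep: cur is the pending element, res is built structurally
def mergeGo (cur : Int) : List Int → List Int
  | [] => [cur]
  | y :: r => if cur = y then cur * 2 :: mergeGo 0 r else cur :: mergeGo y r

def solution_alt (nums : List Int) : List Int :=
  let res := match nums with
    | [] => []
    | x :: rest => mergeGo x rest
  let nz := res.filter (fun v => v != 0)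
  nz ++ List.replicate (nums.length - nz.length) 0

-- ===== PRECONDITION & SPEC =====
def Spec_solution (nums : List Int) (out : List Int) : Prop := out = solution_alt nums
instance (nums : List Int) (out : List Int) : Decidable (Spec_solution nums out) := by unfold Spec_solution; infer_instance

-- ===== CLAIM (what is proved, stated in full; the proofs are below) =====
def Claim_equal_solution : Prop := ∀ (nums : List Int), Dom_solution nums → Spec_solution nums (solution nums)

-- ===== LEMMAS AND PROOFS =====

theorem mergeGo_length (cur : Int) (l : List Int) : (mergeGo cur l).length = l.length + 1 := by
  induction l generalizing cur with
  | nil => simp [mergeGo]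
  | cons y r ih => simp [mergeGo]; split <;> simp [ih]

-- A's first loop, generalized: with a fixed prefix already processed, the index fold
-- starting at pre.length computes the structural merge sweep of (cur :: rest).
theorem merge_loop (rest : List Int) (cur : Int) (pre : List Int) :
    (List.range' pre.length rest.length).foldl pvStep1 (pre ++ cur :: rest)
      = pre ++ mergeGo cur rest := by
  induction rest generalizing cur pre with
  | nil => simp [mergeGo]
  | cons y r ih =>
    rw [List.length_cons, List.range'_succ, List.foldl_cons]
    have hget : (pre ++ cur :: y :: r).getD pre.length 0 = cur := by
      simp
    have hget1 : (pre ++ cur :: y :: r).getD (pre.length + 1) 0 = y := by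
      rw [List.getD_eq_getElem?_getD]
      rw [List.getElem?_append_right (by omega)]
      simp
    by_cases h : cur = y
    · have : pvStep1 (pre ++ cur :: y :: r) pre.length = (pre ++ [cur * 2]) ++ 0 :: r := by
        simp [pvStep1, hget, hget1, h]
      rw [this]
      have hlen : pre.length + 1 = (pre ++ [cur * 2]).length := by simp
      rw [hlen, ih 0 (pre ++ [cur * 2])]
      simp [mergeGo, h]
    · have : pvStep1 (pre ++ cur :: y :: r) pre.length = (pre ++ [cur]) ++ y :: r := by
        simp [pvStep1, hget, hget1, h]
      rw [this]
      have hlen : pre.length + 1 = (pre ++ [cur]).length := by simp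
      rw [hlen, ih y (pre ++ [cur])]
      simp [mergeGo, h]

theorem rep_cons (n : Nat) (d : List Int) :
    List.replicate n (0:Int) ++ 0 :: d = 0 :: (List.replicate n 0 ++ d) := by
  rw [show (0:Int) :: d = [0] ++ d from rfl, ← List.append_assoc, ← List.replicate_succ',
    List.replicate_succ, List.cons_append]

theorem step2_shape (t d : List Int) (zs : Nat) (x : Int) :
    pvStep2 (t ++ List.replicate zs 0 ++ x :: d, t.length) (t.length + zs) =
      if x = 0 then (t ++ List.replicate (zs + 1) 0 ++ d, t.length)
      else (t ++ [x] ++ List.replicate zs 0 ++ d, t.length + 1) := by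
  simp only [List.append_assoc]
  cases zs with
  | zero => by_cases hx : x = 0 <;> simp [pvStep2, hx]
  | succ n =>
    by_cases hx : x = 0 <;> simp [pvStep2, hx, List.replicate_succ] <;> exact rep_cons n d

theorem comp_loop (m : List Int) (k : Nat) (hk : k ≤ m.length) :
    (List.range k).foldl pvStep2 (m, 0)
      = ((m.take k).filter (fun v => v != 0)
          ++ List.replicate (k - ((m.take k).filter (fun v => v != 0)).length) 0
          ++ m.drop k,
         ((m.take k).filter (fun v => v != 0)).length) := by
  induction k with
  | zero => simp
  | succ k ih =>
    have hk' : k < m.length := by omega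
    rw [List.range_succ, List.foldl_append, List.foldl_cons, List.foldl_nil, ih (le_of_lt hk')]
    set t := (m.take k).filter (fun v => v != 0) with ht
    have hj : t.length ≤ k := by
      calc t.length ≤ (m.take k).length := List.length_filter_le _ _
        _ ≤ k := by simp
    have hdrop : m.drop k = m[k] :: m.drop (k+1) := List.drop_eq_getElem_cons hk'
    have htake : m.take (k+1) = m.take k ++ [m[k]] := by
      rw [List.take_add_one]; simp [List.getElem?_eq_getElem hk']
    have hk2 : t.length + (k - t.length) = k := by omega
    have hstep := step2_shape t (m.drop (k+1)) (k - t.length) m[k]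
    rw [hk2] at hstep
    rw [hdrop, hstep]
    rw [htake, List.filter_append, ← ht]
    by_cases hx : m[k] = (0:Int)
    · have h1 : k + 1 - t.length = (k - t.length) + 1 := by omega
      simp [hx, h1]
    · have h1 : k + 1 - (t.length + 1) = k - t.length := by omega
      simp [hx, h1]

theorem solution_eq (nums : List Int) : solution nums = solution_alt nums := by
  cases nums with
  | nil => simp [solution, solution_alt, pvStep2]
  | cons x rest =>
    have hm : (List.range ((x :: rest).length - 1)).foldl pvStep1 (x :: rest)
        = mergeGo x rest := by
      have := merge_loop rest x []
      simpa [List.range_eq_range'] using this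
    have hlen : (mergeGo x rest).length = rest.length + 1 := mergeGo_length x rest
    have hc := comp_loop (mergeGo x rest) (mergeGo x rest).length le_rfl
    simp only [List.take_length, List.drop_length] at hc
    rw [hlen] at hc
    simp only [List.length_cons, Nat.add_sub_cancel] at hm
    simp [solution, solution_alt, hm, hc, hlen]

theorem solution_spec : Claim_equal_solution := by
  intro nums _
  unfold Spec_solution
  exact solution_eq nums
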